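-- pv_equiv track=rewrite | github.com/carloterzaghi/Discord_Bot_Kurami | artefatos_genshin/lv_artefato.py | lv_artefato
-- ===== SOURCE A (Python) =====
-- def lv_artefato(nome):
--     if nome == "Vazio":
--         return ""
--     lv = ''
--     pegar = 'nao'
--     for i in nome:
--         if i == "V":
--             pegar = 'sim'
--         elif i.isnumeric() == False:
--             pegar = 'nao'
--         elif pegar == 'sim':
--             lv = lv + i
--     return lv
-- ===== SOURCE B (Python) =====
-- def lv_artefato(nome):
--     res = []
--     n = len(nome)
--     for i in range(n):
--         if nome[i] == 'V':
--             j = i + 1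
--             while j < n and nome[j].isnumeric():
--                 res.append(nome[j])
--                 j += 1
--     return ''.join(res)
-- ===== Notes on version B (the rewrite author's own statement) =====
-- stated objective: alternative
-- what changed: Replaces the flag-driven state machine ('pegar' sim/nao) and the special 'Vazio' early return by a V-anchored scan: for every position holding 'V', collect the maximal numeric run that follows it; no flag, no special case.
import Mathlib
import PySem

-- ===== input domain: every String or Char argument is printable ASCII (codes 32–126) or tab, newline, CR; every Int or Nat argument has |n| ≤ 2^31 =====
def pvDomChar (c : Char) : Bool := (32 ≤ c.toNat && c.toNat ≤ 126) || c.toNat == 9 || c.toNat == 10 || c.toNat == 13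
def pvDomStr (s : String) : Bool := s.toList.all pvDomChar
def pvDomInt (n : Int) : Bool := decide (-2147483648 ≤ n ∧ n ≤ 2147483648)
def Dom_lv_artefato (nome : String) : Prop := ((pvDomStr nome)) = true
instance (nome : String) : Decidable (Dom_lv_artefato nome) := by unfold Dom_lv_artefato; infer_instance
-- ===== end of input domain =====

-- B replaces A's flag-driven state machine (and its redundant "Vazio" early return)
-- by a V-anchored scan collecting the maximal numeric run after each 'V'; same output, same cost.
-- Python's isnumeric() is ported as PySem.Chars.isdigit, exact on the printable-ASCII domain Dom_lv_artefato.


-- ===== PORT A =====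
-- flag-driven pass: state is (lv accumulated so far, pegar ∈ {"sim","nao"})
def lv_artefato (nome : String) : String :=
  if nome = "Vazio" then "" else
    (nome.toList.foldl (fun (s : List Char × String) i =>
      if i = 'V' then (s.1, "sim")
      else if PySem.Chars.isdigit i = false then (s.1, "nao")
      else if s.2 = "sim" then (s.1 ++ [i], s.2)
      else s) ([], "nao")).1 |> String.ofList

-- ===== PORT B =====
-- outer loop over positions (as suffixes); at a 'V', the inner while-loop is the
-- maximal digit run of the rest (List.takeWhile)
def lvAltGo : List Char → List Char
  | [] => []
  | c :: rest => (if c = 'V' then rest.takeWhile PySem.Chars.isdigit else []) ++ lvAltGo rest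

def lv_artefato_alt (nome : String) : String := String.ofList (lvAltGo nome.toList)

-- ===== PRECONDITION & SPEC =====
def Spec_lv_artefato (nome : String) (out : String) : Prop := out = lv_artefato_alt nome
instance (nome : String) (out : String) : Decidable (Spec_lv_artefato nome out) := by unfold Spec_lv_artefato; infer_instance

-- ===== CLAIM (what is proved, stated in full; the proofs are below) =====
def Claim_equal_lv_artefato : Prop := ∀ (nome : String), Dom_lv_artefato nome → Spec_lv_artefato nome (lv_artefato nome)

-- ===== LEMMAS AND PROOFS =====

-- A's fold, in recursive form, forgetting the accumulator (returned chars only)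
def lvAGo : List Char → String → List Char
  | [], _ => []
  | c :: r, p =>
    if c = 'V' then lvAGo r "sim"
    else if PySem.Chars.isdigit c = false then lvAGo r "nao"
    else if p = "sim" then c :: lvAGo r p
    else lvAGo r p

lemma lvAGo_spec (l : List Char) :
    lvAGo l "nao" = lvAltGo l ∧ lvAGo l "sim" = l.takeWhile PySem.Chars.isdigit ++ lvAltGo l := by
  induction l with
  | nil => simp [lvAGo, lvAltGo]
  | cons c r ih =>
    by_cases hV : c = 'V'
    · subst hV
      have hd : PySem.Chars.isdigit 'V' = false := by decide
      simp [lvAGo, lvAltGo, hd, ih.2, List.takeWhile]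
    · by_cases hd : PySem.Chars.isdigit c = false
      · simp [lvAGo, lvAltGo, hV, hd, ih.1, List.takeWhile]
      · simp only [Bool.not_eq_false] at hd
        simp [lvAGo, lvAltGo, hV, hd, ih.1, ih.2, List.takeWhile]

-- the fold equals the recursive form with an accumulator out front
lemma lv_foldl_eq (l : List Char) (acc : List Char) (p : String) :
    (l.foldl (fun (s : List Char × String) i =>
      if i = 'V' then (s.1, "sim")
      else if PySem.Chars.isdigit i = false then (s.1, "nao")
      else if s.2 = "sim" then (s.1 ++ [i], s.2)
      else s) (acc, p)).1 = acc ++ lvAGo l p := by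
  induction l generalizing acc p with
  | nil => simp [lvAGo]
  | cons c r ih =>
    by_cases hV : c = 'V'
    · simp [hV, lvAGo, ih]
    · by_cases hd : PySem.Chars.isdigit c = false
      · simp [hV, hd, lvAGo, ih]
      · by_cases hp : p = "sim"
        · simp [hV, hd, hp, lvAGo, ih]
        · simp [hV, hd, hp, lvAGo, ih]

-- ===== VERDICT (by name: the statement is the Claim_ definition above) =====
theorem lv_artefato_spec : Claim_equal_lv_artefato := by
  intro nome _
  unfold Spec_lv_artefato lv_artefato lv_artefato_alt
  by_cases hv : nome = "Vazio"
  · subst hv; decide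
  · simp only [hv, if_false, lv_foldl_eq, List.nil_append, (lvAGo_spec nome.toList).1]
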